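-- pv_equiv track=rewrite | github.com/Maalteromm/AoC2020 | day_14/day_14.py | address_combinations
-- ===== SOURCE A (Python) =====
-- def address_combinations(value, addresses=[]):
--   addresses = []
--   addresses.append(value)
--   while True:
--     tmp_addrss = []
--     addresses_len = 0
--     for address in addresses:
--       if 'X' in address:
--         tmp_addrss.append(address.replace('X', '0', 1))
--         tmp_addrss.append(address.replace('X', '1', 1))
--       else:
--         addresses_len += 1
--     if addresses_len == len(addresses):
--       break
--     addresses = tmp_addrss.copy()
--   return addresses
-- ===== SOURCE B (Python) =====
-- def address_combinations(value, addresses=[]):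
--   if 'X' not in value:
--     return [value]
--   return (address_combinations(value.replace('X', '0', 1))
--           + address_combinations(value.replace('X', '1', 1)))
-- ===== Notes on version B (the rewrite author's own statement) =====
-- stated objective: simpler
-- what changed: Replaces the level-by-level list-doubling while-loop (rebuild the whole list each round, count finished entries to detect the fixpoint) by a direct recursive expansion: substitute 0 and 1 at the first wildcard and concatenate the two recursive results, which yields the same left-to-right order.
import Mathlib
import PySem

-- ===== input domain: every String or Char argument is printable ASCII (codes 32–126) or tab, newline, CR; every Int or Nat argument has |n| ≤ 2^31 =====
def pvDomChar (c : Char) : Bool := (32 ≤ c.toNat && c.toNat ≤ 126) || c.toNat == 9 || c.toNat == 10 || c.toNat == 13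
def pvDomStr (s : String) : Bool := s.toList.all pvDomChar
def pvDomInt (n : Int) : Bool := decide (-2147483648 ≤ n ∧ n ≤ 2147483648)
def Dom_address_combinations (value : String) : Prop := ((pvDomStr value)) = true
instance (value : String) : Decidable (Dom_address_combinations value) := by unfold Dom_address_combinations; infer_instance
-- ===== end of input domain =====

-- B replaces A's level-by-level list-doubling while-loop by a direct recursion on the first 'X'
-- (objective: simpler); same return value, no observable side effects.

-- ===== PORT A =====

-- exact port of Python's address.replace('X', b, 1): replace the FIRST occurrence of 'X'
def pvRep1 (b : Char) : List Char → List Char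
  | [] => []
  | c :: cs => if c = 'X' then b :: cs else c :: pvRep1 b cs

-- the 'while True' loop; fuel only makes the same computation total (count('X')+1 rounds suffice)
def pvLoopA : Nat → List (List Char) → List (List Char)
  | 0, addresses => addresses
  | fuel + 1, addresses =>
    let st := addresses.foldl
      (fun (st : List (List Char) × Nat) address =>
        if 'X' ∈ address then
          (st.1 ++ [pvRep1 '0' address, pvRep1 '1' address], st.2)
        else (st.1, st.2 + 1)) ([], 0)
    if st.2 = addresses.length then addresses else pvLoopA fuel st.1

def address_combinations (value : String) : List String :=
  (pvLoopA (value.toList.count 'X' + 1) [value.toList]).map String.ofList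

-- ===== PORT B =====

theorem pvRep1_count_lt {l : List Char} (b : Char) (hb : b ≠ 'X') (h : 'X' ∈ l) :
    (pvRep1 b l).count 'X' < l.count 'X' := by
  induction l with
  | nil => cases h
  | cons c cs ih =>
    by_cases hc : c = 'X'
    · subst hc
      simp [pvRep1, hb]
    · rcases List.mem_cons.mp h with h1 | h2
      · exact absurd h1.symm hc
      · simpa [pvRep1, hc, List.count_cons] using ih h2

def pvDfs (l : List Char) : List (List Char) :=
  if h : 'X' ∈ l then pvDfs (pvRep1 '0' l) ++ pvDfs (pvRep1 '1' l) else [l]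
termination_by l.count 'X'
decreasing_by
  · exact pvRep1_count_lt '0' (by decide) h
  · exact pvRep1_count_lt '1' (by decide) h

def address_combinations_alt (value : String) : List String :=
  (pvDfs value.toList).map String.ofList

-- ===== PRECONDITION & SPEC =====
def Spec_address_combinations (value : String) (out : List String) : Prop := out = address_combinations_alt value
instance (value : String) (out : List String) : Decidable (Spec_address_combinations value out) := by unfold Spec_address_combinations; infer_instance

-- ===== CLAIM (what is proved, stated in full; the proofs are below) =====
def Claim_equal_address_combinations : Prop := ∀ (value : String), Dom_address_combinations value → Spec_address_combinations value (address_combinations value)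

-- ===== LEMMAS AND PROOFS =====

theorem pvRep1_count_of_mem {l : List Char} (b : Char) (hb : b ≠ 'X') (h : 'X' ∈ l) :
    (pvRep1 b l).count 'X' = l.count 'X' - 1 := by
  induction l with
  | nil => cases h
  | cons c cs ih =>
    by_cases hc : c = 'X'
    · subst hc; simp [pvRep1, hb]
    · rcases List.mem_cons.mp h with h1 | h2
      · exact absurd h1.symm hc
      · have hpos : 0 < cs.count 'X' := List.count_pos_iff.mpr h2
        simp only [pvRep1, if_neg hc, List.count_cons]
        rw [ih h2]
        omega

theorem pvDfs_of_not_mem {l : List Char} (h : ¬ 'X' ∈ l) : pvDfs l = [l] := by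
  rw [pvDfs]; simp [h]

theorem pvDfs_of_mem {l : List Char} (h : 'X' ∈ l) :
    pvDfs l = pvDfs (pvRep1 '0' l) ++ pvDfs (pvRep1 '1' l) := by
  rw [pvDfs]; simp [h]

-- the body fold of A's while loop, characterised with a general accumulator
theorem pvFoldA_eq (xs : List (List Char)) (t : List (List Char)) (k : Nat) :
    xs.foldl
      (fun (st : List (List Char) × Nat) address =>
        if 'X' ∈ address then
          (st.1 ++ [pvRep1 '0' address, pvRep1 '1' address], st.2)
        else (st.1, st.2 + 1)) (t, k)
    = (t ++ xs.flatMap (fun a => if 'X' ∈ a then [pvRep1 '0' a, pvRep1 '1' a] else []),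
       k + xs.countP (fun a => ¬ 'X' ∈ a)) := by
  induction xs generalizing t k with
  | nil => simp
  | cons a rest ih =>
    by_cases ha : 'X' ∈ a
    · simp [List.foldl_cons, ha, ih]
    · simp [List.foldl_cons, ha, ih, Nat.add_assoc, Nat.add_comm 1]

-- invariant: all addresses in the level carry the same number of X's
theorem pvLoopA_eq_flatMap_dfs (fuel : Nat) :
    ∀ (n : Nat) (xs : List (List Char)), n < fuel →
      (∀ a ∈ xs, a.count 'X' = n) → pvLoopA fuel xs = xs.flatMap pvDfs := by
  induction fuel with
  | zero => intro n xs _h _; omega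

  | succ f ih =>
    intro n xs hf hall
    rw [pvLoopA]
    rw [show ([], 0) = (([] : List (List Char)), (0 : Nat)) from rfl, pvFoldA_eq]
    rcases Nat.eq_zero_or_pos n with hn | hn
    · -- no address contains 'X': the loop breaks and dfs is the identity singleton
      have hno : ∀ a ∈ xs, ¬ 'X' ∈ a := by
        intro a ha hmem
        have := List.count_pos_iff.mpr hmem
        rw [hall a ha, hn] at this; omega
      have hcnt : xs.countP (fun a => ¬ 'X' ∈ a) = xs.length := by
        rw [List.countP_eq_length]
        intro a ha; simpa using hno a ha
      simp only [hcnt, Nat.zero_add, if_true]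
      rw [List.flatMap_congr (g := fun a => [a]) (fun a ha => pvDfs_of_not_mem (hno a ha))]
      simp
    · -- every address contains 'X' (count = n > 0): one full doubling round, then recurse
      have hyes : ∀ a ∈ xs, 'X' ∈ a := by
        intro a ha
        have : 0 < a.count 'X' := by rw [hall a ha]; omega
        exact List.count_pos_iff.mp this
      cases xs with
      | nil => simp
      | cons a0 rest =>
        have hcnt0 : (a0 :: rest).countP (fun a => ¬ 'X' ∈ a) = 0 := by
          rw [List.countP_eq_zero]
          intro a ha; simpa using hyes a ha
        rw [if_neg (by rw [Nat.zero_add, hcnt0]; simp)]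
        have hflat : ((a0 :: rest).flatMap
            (fun a => if 'X' ∈ a then [pvRep1 '0' a, pvRep1 '1' a] else []))
            = (a0 :: rest).flatMap (fun a => [pvRep1 '0' a, pvRep1 '1' a]) :=
          List.flatMap_congr (fun a ha => by rw [if_pos (hyes a ha)])
        rw [List.nil_append, hflat]
        rw [ih (n - 1) _ (by omega)]
        · rw [List.flatMap_assoc]
          refine (List.flatMap_congr ?_).symm
          intro a ha
          rw [pvDfs_of_mem (hyes a ha)]
          simp
        · intro b hb
          rcases List.mem_flatMap.mp hb with ⟨a, ha, hba⟩
          have hbcases : b = pvRep1 '0' a ∨ b = pvRep1 '1' a := by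
            simpa using hba
          rcases hbcases with h | h <;>
            · subst h
              rw [pvRep1_count_of_mem _ (by decide) (hyes a ha), hall a ha]

-- ===== VERDICT (by name: the statement is the Claim_ definition above) =====
theorem address_combinations_spec : Claim_equal_address_combinations := by
  intro value _
  unfold Spec_address_combinations address_combinations address_combinations_alt
  rw [pvLoopA_eq_flatMap_dfs (value.toList.count 'X' + 1) (value.toList.count 'X')
    [value.toList] (by omega)
    (by intro a ha; rw [List.mem_singleton.mp ha])]
  simp
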